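-- pv_equiv track=rewrite | github.com/Vitamin-B13/JuiceChain | src/juicechain/core/enumeration.py | _normalize_wordlist_entries
-- ===== SOURCE A (Python) =====
-- from typing import Any, Iterable
--
-- def _normalize_wordlist_entries(entries: Iterable[str]) -> list[str]:
--     out: list[str] = []
--     seen: set[str] = set()
--     for raw in entries:
--         s = (raw or "").strip()
--         if not s or s.startswith("#"):
--             continue
--         if not s.startswith("/"):
--             s = "/" + s
--         if s in seen:
--             continue
--         seen.add(s)
--         out.append(s)
--     return out
-- ===== SOURCE B (Python) =====
-- def _normalize_wordlist_entries(entries):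
--     normalized = []
--     for raw in entries:
--         s = (raw or "").strip()
--         if not s or s.startswith("#"):
--             continue
--         normalized.append(s if s.startswith("/") else "/" + s)
--     out = []
--     work = normalized
--     while work:
--         head = work[0]
--         out.append(head)
--         work = [x for x in work[1:] if x != head]
--     return out
-- ===== Notes on version B (the rewrite author's own statement) =====
-- stated objective: alternative
-- what changed: B first normalizes every entry into a plain list (keeping duplicates), then deduplicates with a head-extraction worklist: repeatedly emit the first element and filter all its later duplicates out of the remaining list, so no seen-set or dict membership test exists anywhere.
import Mathlib
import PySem

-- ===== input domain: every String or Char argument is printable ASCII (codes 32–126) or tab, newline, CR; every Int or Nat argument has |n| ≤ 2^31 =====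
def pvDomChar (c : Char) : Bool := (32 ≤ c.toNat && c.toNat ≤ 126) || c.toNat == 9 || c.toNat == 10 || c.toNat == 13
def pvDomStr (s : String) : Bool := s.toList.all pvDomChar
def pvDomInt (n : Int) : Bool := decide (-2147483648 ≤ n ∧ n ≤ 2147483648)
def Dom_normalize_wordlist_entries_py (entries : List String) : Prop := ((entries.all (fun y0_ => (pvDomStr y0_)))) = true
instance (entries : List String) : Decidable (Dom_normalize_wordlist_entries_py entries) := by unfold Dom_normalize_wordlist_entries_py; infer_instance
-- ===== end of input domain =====

-- B replaces A's interleaved seen-set loop by a normalize-only pass followed by a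
-- head-extraction worklist dedup (emit first element, filter its duplicates out);
-- objective: alternative decomposition, same return value.

-- ===== PORT A =====
-- A: one loop threading (out, seen); 'raw or ""' is the identity on strings, so s = raw.strip()
def pvStepA (st : List String × PySem.Set String) (raw : String) : List String × PySem.Set String :=
  let s := PySem.Str.strip raw
  if s = "" || PySem.Str.startswith s "#" then st
  else
    let s := if PySem.Str.startswith s "/" then s else "/" ++ s
    if PySem.Set.contains st.2 s then st
    else (st.1 ++ [s], PySem.Set.add st.2 s)

def normalize_wordlist_entries_py (entries : List String) : List String :=
  (entries.foldl pvStepA ([], PySem.Set.empty)).1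

-- ===== PORT B =====
-- B pass 1: normalize every entry, keeping duplicates
def pvStepB (acc : List String) (raw : String) : List String :=
  let s := PySem.Str.strip raw
  if s = "" || PySem.Str.startswith s "#" then acc
  else acc ++ [if PySem.Str.startswith s "/" then s else "/" ++ s]

-- B pass 2: the while-loop worklist — emit the head, drop its later duplicates
def pvUniq : List String → List String
  | [] => []
  | head :: rest => head :: pvUniq (rest.filter (fun x => x ≠ head))
termination_by work => work.length
decreasing_by
  simp only [List.length_unattach, List.length_cons, Nat.lt_succ_iff]
  exact (List.length_filter_le _ _).trans (le_of_eq List.length_attach)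

def normalize_wordlist_entries_py_alt (entries : List String) : List String :=
  pvUniq (entries.foldl pvStepB [])

-- ===== PRECONDITION & SPEC =====
def Spec_normalize_wordlist_entries_py (entries : List String) (out : List String) : Prop := out = normalize_wordlist_entries_py_alt entries
instance (entries : List String) (out : List String) : Decidable (Spec_normalize_wordlist_entries_py entries out) := by unfold Spec_normalize_wordlist_entries_py; infer_instance

-- ===== CLAIM =====
def Claim_equal_normalize_wordlist_entries_py : Prop := ∀ (entries : List String), Dom_normalize_wordlist_entries_py entries → Spec_normalize_wordlist_entries_py entries (normalize_wordlist_entries_py entries)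

-- ===== LEMMAS AND PROOFS =====
-- proof-only view of one normalization step (none = dropped)
def pvNorm (raw : String) : Option String :=
  let s := PySem.Str.strip raw
  if s = "" || PySem.Str.startswith s "#" then none
  else some (if PySem.Str.startswith s "/" then s else "/" ++ s)

theorem pvStepA_eq (st : List String × PySem.Set String) (raw : String) :
    pvStepA st raw
    = match pvNorm raw with
      | none => st
      | some s => if PySem.Set.contains st.2 s then st else (st.1 ++ [s], PySem.Set.add st.2 s) := by
  unfold pvStepA pvNorm
  by_cases h : (PySem.Str.strip raw = "" ∨ PySem.Chars.startswith (PySem.Chars.strip raw.toList) ['#'] = true)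
  · simp [h]
  · simp [h]

theorem pvStepB_eq (acc : List String) (raw : String) :
    pvStepB acc raw = match pvNorm raw with | none => acc | some s => acc ++ [s] := by
  unfold pvStepB pvNorm
  by_cases h : (PySem.Str.strip raw = "" ∨ PySem.Chars.startswith (PySem.Chars.strip raw.toList) ['#'] = true)
  · simp [h]
  · simp [h]

-- invariant: A's 'seen' set IS its 'out' list, and the fold is Set.add over the normalized survivors
theorem pvFold_inv (entries : List String) (acc : List String) :
    entries.foldl pvStepA (acc, acc)
    = (((entries.map pvNorm).filterMap id).foldl PySem.Set.add acc,
       ((entries.map pvNorm).filterMap id).foldl PySem.Set.add acc) := by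
  induction entries generalizing acc with
  | nil => rfl
  | cons raw rest ih =>
    rw [List.foldl_cons, pvStepA_eq]
    cases h : pvNorm raw with
    | none => simp [h, ih]
    | some s =>
      simp only [List.map_cons, List.filterMap_cons, h, id, List.foldl_cons]
      rw [show (PySem.Set.add acc s) = (if PySem.Set.contains acc s then acc else acc ++ [s]) from rfl]
      by_cases hc : PySem.Set.contains acc s = true
      · simp only [hc, if_true]; exact ih acc
      · simp only [hc]; exact ih (acc ++ [s])

-- B's normalize pass computes the same survivor list
theorem pvFoldB (entries : List String) (acc : List String) :
    entries.foldl pvStepB acc = acc ++ (entries.map pvNorm).filterMap id := by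
  induction entries generalizing acc with
  | nil => simp
  | cons raw rest ih =>
    rw [List.foldl_cons, pvStepB_eq]
    cases h : pvNorm raw with
    | none => simp [h, ih]
    | some s => simp [h, ih]

-- ofList commutes with filter
theorem pvOfList_filter (p : String → Bool) (xs : List String) :
    PySem.Set.ofList (xs.filter p) = (PySem.Set.ofList xs).filter p := by
  induction xs with
  | nil => rfl
  | cons y ys ih =>
    by_cases h : p y = true
    · rw [List.filter_cons_of_pos h, PySem.Set.ofList_cons, PySem.Set.ofList_cons,
          List.filter_cons_of_pos h, ih]
      congr 1
      simp only [PySem.Set.discard, List.filter_filter]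
      exact List.filter_congr (fun z _ => by rw [Bool.and_comm])
    · rw [List.filter_cons_of_neg h, PySem.Set.ofList_cons, List.filter_cons_of_neg h, ih]
      simp only [PySem.Set.discard, List.filter_filter]
      refine (List.filter_congr (fun z _ => ?_)).symm
      by_cases hz : z = y
      · subst hz; simp [h]
      · simp [hz]

-- the worklist dedup is exactly first-occurrence dedup (set-of-list)
theorem pvUniq_eq (xs : List String) : pvUniq xs = PySem.Set.ofList xs := by
  induction hn : xs.length using Nat.strong_induction_on generalizing xs with
  | _ n ih =>
    cases xs with
    | nil => rw [pvUniq.eq_def]; rfl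
    | cons head rest =>
      rw [pvUniq.eq_def]
      show head :: pvUniq (rest.filter (fun x => decide (x ≠ head))) = PySem.Set.ofList (head :: rest)
      have hlt : (rest.filter (fun x => decide (x ≠ head))).length < n := by
        subst hn
        exact Nat.lt_succ_of_le (List.length_filter_le _ _)
      rw [ih _ hlt _ rfl, PySem.Set.ofList_cons]
      congr 1
      rw [show (fun x => decide (x ≠ head)) = (fun x => !(x == head)) from by
            funext x; by_cases hx : x = head <;> simp [hx]]
      rw [pvOfList_filter]
      rfl

-- ===== VERDICT =====
theorem normalize_wordlist_entries_py_spec : Claim_equal_normalize_wordlist_entries_py := by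
  intro entries _
  show normalize_wordlist_entries_py entries = normalize_wordlist_entries_py_alt entries
  unfold normalize_wordlist_entries_py normalize_wordlist_entries_py_alt
  rw [show (PySem.Set.empty : PySem.Set String) = ([] : List String) from rfl]
  rw [pvFold_inv entries [], pvFoldB entries [], pvUniq_eq, List.nil_append]
  rw [PySem.Set.ofList_eq_foldl]
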